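-- pv_equiv track=rewrite | github.com/MrBrantCode/unitest_baseline | mut_generate/mist_train_cf/cf_62612/solution.py | remove_duplicates_2D_list
-- ===== SOURCE A (Python) =====
-- def remove_duplicates_2D_list(lst):
--     # create a set to store unique elements
--     seen = set()
--
--     # create a new list to store the result
--     result = []
--
--     # loop through the lists in the given 2D list
--     for sublist in lst:
--         new_sublist = []
--         for element in sublist:
--             # if the element has not been encountered before, add it to the set
--             # and the new sublist
--             if element not in seen:
--                 seen.add(element)
--                 new_sublist.append(element)
--         # add the new sublist to the result
--         result.append(new_sublist)
--
--     return result
-- ===== SOURCE B (Python) =====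
-- def remove_duplicates_2D_list(lst):
--     # pass 1: flatten in row-major order and record each value's first flat index
--     flat = [x for sub in lst for x in sub]
--     first = {}
--     for i, x in enumerate(flat):
--         if x not in first:
--             first[x] = i
--     # pass 2: keep an element only at its recorded first-occurrence flat index
--     result = []
--     c = 0
--     for sub in lst:
--         new = []
--         for x in sub:
--             if first[x] == c:
--                 new.append(x)
--             c += 1
--         result.append(new)
--     return result
-- ===== Notes on version B (the rewrite author's own statement) =====
-- stated objective: alternative
-- what changed: Replaces A's incremental seen-set single pass with a two-pass strategy: flatten and build a first-occurrence flat-index table, then re-walk the structure with a running flat counter keeping an element only where its counter equals its recorded first index.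
import Mathlib
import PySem

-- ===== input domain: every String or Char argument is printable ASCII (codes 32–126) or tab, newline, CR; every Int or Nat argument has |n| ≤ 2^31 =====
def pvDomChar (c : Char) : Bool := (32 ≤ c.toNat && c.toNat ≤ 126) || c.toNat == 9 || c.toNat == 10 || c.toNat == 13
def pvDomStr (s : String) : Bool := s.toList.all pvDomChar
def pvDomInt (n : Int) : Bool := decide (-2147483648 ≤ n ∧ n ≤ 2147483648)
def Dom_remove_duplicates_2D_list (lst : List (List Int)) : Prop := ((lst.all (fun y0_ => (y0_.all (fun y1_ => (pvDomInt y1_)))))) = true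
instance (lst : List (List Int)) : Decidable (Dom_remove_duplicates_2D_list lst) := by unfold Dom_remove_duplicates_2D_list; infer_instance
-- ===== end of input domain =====

-- B replaces A's incremental seen-set single pass with a two-pass strategy
-- (first-occurrence flat-index table, then filter by a running flat counter); objective: alternative.

-- ===== PORT A =====
def remove_duplicates_2D_list (lst : List (List Int)) : List (List Int) :=
  (lst.foldl (fun (st : PySem.Set Int × List (List Int)) sublist =>
      let inner := sublist.foldl (fun (t : PySem.Set Int × List Int) element =>
          if PySem.Set.contains t.1 element then t
          else (PySem.Set.add t.1 element, t.2 ++ [element])) (st.1, ([] : List Int))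
      (inner.1, st.2 ++ [inner.2]))
    ((PySem.Set.empty : PySem.Set Int), ([] : List (List Int)))).2

-- ===== PORT B =====
-- pass 1 of Source B: dict mapping each value to its first flat index
def pvFirstIdx (flat : List Int) : PySem.Dict Int Int :=
  (PySem.List.enumerate flat 0).foldl
    (fun d p => if d.contains p.2 then d else d.insert p.2 p.1) PySem.Dict.empty

def remove_duplicates_2D_list_alt (lst : List (List Int)) : List (List Int) :=
  let flat := lst.foldl (fun acc sub => acc ++ sub) []
  let first := pvFirstIdx flat
  -- pass 2: x is always a key of `first`, so Python's first[x] never raises; getD is exact here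
  (lst.foldl (fun (st : Int × List (List Int)) sub =>
      let inner := sub.foldl (fun (t : Int × List Int) x =>
          (t.1 + 1, if first.getD x (-1) == t.1 then t.2 ++ [x] else t.2)) (st.1, ([] : List Int))
      (inner.1, st.2 ++ [inner.2])) ((0 : Int), ([] : List (List Int)))).2

-- ===== PRECONDITION & SPEC =====
def Spec_remove_duplicates_2D_list (lst : List (List Int)) (out : List (List Int)) : Prop := out = remove_duplicates_2D_list_alt lst
instance (lst : List (List Int)) (out : List (List Int)) : Decidable (Spec_remove_duplicates_2D_list lst out) := by unfold Spec_remove_duplicates_2D_list; infer_instance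

-- ===== CLAIM (what is proved, stated in full; the proofs are below) =====
def Claim_equal_remove_duplicates_2D_list : Prop := ∀ (lst : List (List Int)), Dom_remove_duplicates_2D_list lst → Spec_remove_duplicates_2D_list lst (remove_duplicates_2D_list lst)

-- ===== LEMMAS AND PROOFS =====

-- the dict built by pass 1 records, for each x in flat, x's first index (offset by the start s)
lemma pvFirstIdx_go (x : Int) (flat : List Int) : ∀ (s : Int) (d : PySem.Dict Int Int),
    ((PySem.List.enumerate flat s).foldl
        (fun d p => if d.contains p.2 then d else d.insert p.2 p.1) d).get? x
      = if (d.get? x).isSome then d.get? x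
        else if x ∈ flat then some (s + (flat.idxOf x : Int)) else none := by
  induction flat with
  | nil =>
    intro s d
    simp only [PySem.List.enumerate_nil, List.foldl_nil, List.not_mem_nil, if_false]
    cases h : d.get? x <;> simp
  | cons y ys ih =>
    intro s d
    rw [PySem.List.enumerate_cons, List.foldl_cons]
    by_cases hxy : x = y
    · subst hxy
      by_cases hc : d.contains x = true
      · have hs : (d.get? x).isSome := by rw [PySem.Dict.contains_eq_isSome_get?] at hc; exact hc
        simp only [hc, if_true]
        rw [ih]; simp [hs]
      · have hs : (d.get? x).isSome = false := by
          rw [PySem.Dict.contains_eq_isSome_get?] at hc; simpa using hc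
        simp only [hc, Bool.false_eq_true, if_false]
        rw [ih]
        simp [PySem.Dict.get?_insert_self, hs]
    · have hyx : ¬ (y = x) := fun h => hxy h.symm
      have hstep : ∀ d' : PySem.Dict Int Int,
          d' = (if d.contains y then d else d.insert y s) → d'.get? x = d.get? x := by
        intro d' hd'; subst hd'; split
        · rfl
        · exact PySem.Dict.get?_insert_of_ne _ _ hxy
      rw [ih]
      rw [hstep _ rfl]
      by_cases hs : (d.get? x).isSome
      · simp [hs]
      · simp only [hs, Bool.false_eq_true, if_false]
        have hmem : x ∈ y :: ys ↔ x ∈ ys := by simp [hxy]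
        by_cases hm : x ∈ ys
        · simp only [hm, if_true, hmem.mpr hm, if_true]
          rw [List.idxOf_cons_ne _ (by exact hyx)]
          push_cast; ring_nf
        · simp [hm, hmem]

lemma pvFirstIdx_getD (flat : List Int) (x : Int) (h : x ∈ flat) :
    (pvFirstIdx flat).getD x (-1) = (flat.idxOf x : Int) := by
  unfold pvFirstIdx
  rw [PySem.Dict.getD_eq_get?_getD, pvFirstIdx_go]
  simp [PySem.Dict.get?_empty, h]

-- the pass-2 condition fires exactly when x has not occurred before the current flat position
lemma pvCond_of_mem (p rest : List Int) (x : Int) (h : x ∈ p) :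
    ((pvFirstIdx (p ++ x :: rest)).getD x (-1) == (p.length : Int)) = false := by
  rw [pvFirstIdx_getD _ _ (by simp)]
  have hlt : (p ++ x :: rest).idxOf x < p.length := by
    rw [List.idxOf_append_of_mem h]; exact List.idxOf_lt_length_of_mem h
  simp only [beq_eq_false_iff_ne, ne_eq]
  intro hEq
  have := Int.ofNat.inj hEq
  omega

lemma pvCond_of_not_mem (p rest : List Int) (x : Int) (h : x ∉ p) :
    ((pvFirstIdx (p ++ x :: rest)).getD x (-1) == (p.length : Int)) = true := by
  rw [pvFirstIdx_getD _ _ (by simp)]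
  simp [List.idxOf_append, h]

lemma pvSeen_contains (seen : PySem.Set Int) (p : List Int) (x : Int)
    (hseen : ∀ y, y ∈ seen ↔ y ∈ p) : PySem.Set.contains seen x = decide (x ∈ p) := by
  simp [PySem.Set.contains, List.contains_eq_mem, hseen]

-- one row: A's seen-set filter and B's index-table filter produce the same sublist
lemma pvInner_eq (flat : List Int) (r : List Int) : ∀ (p rest acc : List Int) (seen : PySem.Set Int),
    flat = p ++ r ++ rest → (∀ y, y ∈ seen ↔ y ∈ p) →
    (r.foldl (fun (t : PySem.Set Int × List Int) element =>
        if PySem.Set.contains t.1 element then t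
        else (PySem.Set.add t.1 element, t.2 ++ [element])) (seen, acc)).2
      = (r.foldl (fun (t : Int × List Int) x =>
          (t.1 + 1, if (pvFirstIdx flat).getD x (-1) == t.1 then t.2 ++ [x] else t.2))
          ((p.length : Int), acc)).2
    ∧ (r.foldl (fun (t : Int × List Int) x =>
          (t.1 + 1, if (pvFirstIdx flat).getD x (-1) == t.1 then t.2 ++ [x] else t.2))
          ((p.length : Int), acc)).1 = ((p ++ r).length : Int)
    ∧ (∀ y, y ∈ (r.foldl (fun (t : PySem.Set Int × List Int) element =>
        if PySem.Set.contains t.1 element then t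
        else (PySem.Set.add t.1 element, t.2 ++ [element])) (seen, acc)).1 ↔ y ∈ p ++ r) := by
  induction r with
  | nil =>
    intro p rest acc seen hflat hseen
    exact ⟨rfl, by simp, by simpa using hseen⟩
  | cons x r' ih =>
    intro p rest acc seen hflat hseen
    rw [List.foldl_cons, List.foldl_cons]
    have hflat' : flat = (p ++ [x]) ++ r' ++ rest := by simp [hflat]
    have hcast : ((p ++ [x]).length : Int) = (p.length : Int) + 1 := by simp
    by_cases hm : x ∈ p
    · have hA : PySem.Set.contains seen x = true := by rw [pvSeen_contains seen p x hseen]; simp [hm]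
      have hB := pvCond_of_mem p (r' ++ rest) x hm
      rw [show p ++ x :: (r' ++ rest) = p ++ [x] ++ r' ++ rest by simp] at hB
      rw [← hflat'] at hB
      simp only [hA, if_true, hB, Bool.false_eq_true, if_false]
      have hseen' : ∀ y, y ∈ seen ↔ y ∈ p ++ [x] := by
        intro y; rw [hseen y]; simp; intro hy; subst hy; exact hm
      have := ih (p ++ [x]) rest acc seen hflat' hseen'
      rw [hcast] at this
      refine ⟨this.1, ?_, ?_⟩
      · rw [this.2.1]; simp
      · intro y; rw [this.2.2 y]; simp
    · have hA : PySem.Set.contains seen x = false := by rw [pvSeen_contains seen p x hseen]; simp [hm]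
      have hB := pvCond_of_not_mem p (r' ++ rest) x hm
      rw [show p ++ x :: (r' ++ rest) = p ++ [x] ++ r' ++ rest by simp] at hB
      rw [← hflat'] at hB
      simp only [hA, Bool.false_eq_true, if_false, hB, if_true]
      have hseen' : ∀ y, y ∈ PySem.Set.add seen x ↔ y ∈ p ++ [x] := by
        intro y; rw [PySem.Set.mem_add]; simp [hseen y]
      have := ih (p ++ [x]) rest (acc ++ [x]) (PySem.Set.add seen x) hflat' hseen'
      rw [hcast] at this
      refine ⟨this.1, ?_, ?_⟩
      · rw [this.2.1]; simp
      · intro y; rw [this.2.2 y]; simp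

-- all rows: the two outer loops agree given the prefix invariant
lemma pvOuter_eq (flat : List Int) (R : List (List Int)) :
    ∀ (p : List Int) (acc : List (List Int)) (seen : PySem.Set Int),
    flat = p ++ R.flatten → (∀ y, y ∈ seen ↔ y ∈ p) →
    (R.foldl (fun (st : PySem.Set Int × List (List Int)) sublist =>
        let inner := sublist.foldl (fun (t : PySem.Set Int × List Int) element =>
            if PySem.Set.contains t.1 element then t
            else (PySem.Set.add t.1 element, t.2 ++ [element])) (st.1, ([] : List Int))
        (inner.1, st.2 ++ [inner.2])) (seen, acc)).2
      = (R.foldl (fun (st : Int × List (List Int)) sub =>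
          let inner := sub.foldl (fun (t : Int × List Int) x =>
              (t.1 + 1, if (pvFirstIdx flat).getD x (-1) == t.1 then t.2 ++ [x] else t.2)) (st.1, ([] : List Int))
          (inner.1, st.2 ++ [inner.2])) (((p.length : Nat) : Int), acc)).2 := by
  induction R with
  | nil => intro p acc seen _ _; rfl
  | cons r R' ih =>
    intro p acc seen hflat hseen
    rw [List.foldl_cons, List.foldl_cons]
    have hflat1 : flat = p ++ r ++ R'.flatten := by simp [hflat]
    obtain ⟨h1, h2, h3⟩ := pvInner_eq flat r p R'.flatten [] seen hflat1 hseen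
    simp only []
    rw [h1, h2]
    exact ih (p ++ r) _ _ (by simp [hflat1]) h3

lemma pvFoldlAppend (lst : List (List Int)) (acc : List Int) :
    lst.foldl (fun acc sub => acc ++ sub) acc = acc ++ lst.flatten := by
  induction lst generalizing acc <;> simp_all

-- ===== VERDICT (by name: the statement is the Claim_ definition above) =====
theorem remove_duplicates_2D_list_spec : Claim_equal_remove_duplicates_2D_list := by
  intro lst _
  unfold Spec_remove_duplicates_2D_list remove_duplicates_2D_list remove_duplicates_2D_list_alt
  simp only [pvFoldlAppend, List.nil_append]
  have := pvOuter_eq lst.flatten lst [] [] PySem.Set.empty (by simp) (by simp [PySem.Set.empty])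
  simpa using this
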